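-- pv_equiv track=rewrite | github.com/Dou-Yu-xuan/-kinship- | utils/loader.py | _crs_kinlis
-- ===== SOURCE A (Python) =====
-- def _crs_kinlis(kls):
--     """
--     cross the pos and neg item
--     :param kls:
--     :return:
--     """
--     cr_ls = [] # get the cross fold number list
--     for kl in kls:
--         if kl[0] not in cr_ls:
--             cr_ls.append(kl[0])
--
--     new_list = []
--
--     def get_crs(pos, neg): # all the negative label and positive label are crossed
--         n_ls = []
--         for a, b in zip(pos, neg):
--             n_ls.append(a)
--             n_ls.append(b)
--         return n_ls
--
--     for fd in cr_ls:
--         pos = []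
--         neg = []
--         for kl in kls:
--             if kl[0] == fd:
--                 if kl[1] == 1:
--                     pos.append(kl)
--                 else:
--                     neg.append(kl)
--         new_list += get_crs(pos, neg)
--     return new_list
-- ===== SOURCE B (Python) =====
-- def _crs_kinlis(kls):
--     """
--     cross the pos and neg item
--     :param kls:
--     :return:
--     """
--     groups = {}  # fold number -> its items, one pass, insertion order = first occurrence
--     for kl in kls:
--         groups.setdefault(kl[0], []).append(kl)
--     new_list = []
--     for g in groups.values():
--         pos = [kl for kl in g if kl[1] == 1]
--         neg = [kl for kl in g if kl[1] != 1]
--         for a, b in zip(pos, neg):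
--             new_list.append(a)
--             new_list.append(b)
--     return new_list
-- ===== Notes on version B (the rewrite author's own statement) =====
-- stated objective: faster
-- what changed: replaces the rescan of the whole input for every distinct fold (dedup list + one full pass per fold) by a single-pass grouping into an insertion-ordered dict, then interleaves each group's pos/neg items
import Mathlib
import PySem

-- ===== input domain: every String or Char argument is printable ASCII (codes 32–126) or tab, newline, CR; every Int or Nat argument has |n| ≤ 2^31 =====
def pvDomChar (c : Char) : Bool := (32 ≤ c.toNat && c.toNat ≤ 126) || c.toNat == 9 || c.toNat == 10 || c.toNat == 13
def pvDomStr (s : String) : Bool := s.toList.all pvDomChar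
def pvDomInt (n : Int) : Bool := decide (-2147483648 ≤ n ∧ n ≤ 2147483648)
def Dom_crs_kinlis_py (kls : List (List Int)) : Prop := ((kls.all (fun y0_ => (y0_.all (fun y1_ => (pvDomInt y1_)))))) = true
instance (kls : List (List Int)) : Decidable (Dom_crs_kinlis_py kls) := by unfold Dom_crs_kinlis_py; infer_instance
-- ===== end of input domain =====

-- B replaces A's per-fold rescan of the whole input by a single-pass dict grouping (objective: faster).

def pvGetCrs (pos neg : List (List Int)) : List (List Int) :=
  (pos.zip neg).foldl (fun n_ls ab => n_ls ++ [ab.1, ab.2]) []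

def crs_kinlis_py (kls : List (List Int)) : List (List Int) :=
  let cr_ls : List Int := kls.foldl (fun cr_ls kl =>
    if PySem.List.pyGetD kl 0 0 ∈ cr_ls then cr_ls else cr_ls ++ [PySem.List.pyGetD kl 0 0]) []
  cr_ls.foldl (fun new_list fd =>
    let pn := kls.foldl (fun (pn : List (List Int) × List (List Int)) kl =>
      if PySem.List.pyGetD kl 0 0 = fd then
        (if PySem.List.pyGetD kl 1 0 = 1 then (pn.1 ++ [kl], pn.2) else (pn.1, pn.2 ++ [kl]))
      else pn) (([], []) : List (List Int) × List (List Int))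
    new_list ++ pvGetCrs pn.1 pn.2) []

def crs_kinlis_py_alt (kls : List (List Int)) : List (List Int) :=
  let groups : PySem.Dict Int (List (List Int)) :=
    kls.foldl (fun d kl => d.modify (PySem.List.pyGetD kl 0 0) [] (· ++ [kl])) PySem.Dict.empty
  groups.values.foldl (fun new_list g =>
    let pos := g.filter (fun kl => PySem.List.pyGetD kl 1 0 == 1)
    let neg := g.filter (fun kl => !(PySem.List.pyGetD kl 1 0 == 1))
    (pos.zip neg).foldl (fun nl ab => nl ++ [ab.1, ab.2]) new_list) []


-- ===== PRECONDITION & SPEC =====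
-- Pre_ excludes inputs containing an inner list of length < 2: Python A raises IndexError there (on kl[0] or kl[1]); B raises too.
def Pre_crs_kinlis_py (kls : List (List Int)) : Prop := ∀ kl ∈ kls, 2 ≤ kl.length
instance (kls : List (List Int)) : Decidable (Pre_crs_kinlis_py kls) := by unfold Pre_crs_kinlis_py; infer_instance
def pvWitness_crs_kinlis_py : List (List Int) := [[0, 1, 7], [0, 0, 3], [1, 0], [0, 1]]

def Spec_crs_kinlis_py (kls : List (List Int)) (out : List (List Int)) : Prop := out = crs_kinlis_py_alt kls
instance (kls : List (List Int)) (out : List (List Int)) : Decidable (Spec_crs_kinlis_py kls out) := by unfold Spec_crs_kinlis_py; infer_instance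

-- ===== CLAIM (what is proved, stated in full; the proofs are below) =====
def Claim_equal_crs_kinlis_py : Prop := ∀ (kls : List (List Int)), Dom_crs_kinlis_py kls → Pre_crs_kinlis_py kls → Spec_crs_kinlis_py kls (crs_kinlis_py kls)

-- ===== LEMMAS AND PROOFS =====

def pvK (kl : List Int) : Int := PySem.List.pyGetD kl 0 0
def pvIsPos (kl : List Int) : Bool := PySem.List.pyGetD kl 1 0 == 1
def pvCross (p n : List (List Int)) : List (List Int) := (p.zip n).flatMap (fun ab => [ab.1, ab.2])
def pvOut (kls : List (List Int)) : List (List Int) :=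
  (PySem.Set.ofList (kls.map pvK)).flatMap (fun fd =>
    pvCross (kls.filter (fun kl => pvK kl == fd && pvIsPos kl))
            (kls.filter (fun kl => pvK kl == fd && !pvIsPos kl)))

theorem pvPartition_fold (kls : List (List Int)) (fd : Int) (p0 n0 : List (List Int)) :
    kls.foldl (fun (pn : List (List Int) × List (List Int)) kl =>
      if PySem.List.pyGetD kl 0 0 = fd then
        (if PySem.List.pyGetD kl 1 0 = 1 then (pn.1 ++ [kl], pn.2) else (pn.1, pn.2 ++ [kl]))
      else pn) (p0, n0)
    = (p0 ++ kls.filter (fun kl => pvK kl == fd && pvIsPos kl),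
       n0 ++ kls.filter (fun kl => pvK kl == fd && !pvIsPos kl)) := by
  induction kls generalizing p0 n0 with
  | nil => simp
  | cons kl rest ih =>
    simp only [List.foldl_cons, List.filter_cons, pvK, pvIsPos]
    split_ifs with h1 h2 <;> simp_all [pvK, pvIsPos]

theorem pvValues_eq_keys_map {ν : Type} (d : PySem.Dict Int ν) (d0 : ν) (h : d.keys.Nodup) :
    d.values = d.keys.map (fun k => d.getD k d0) := by
  simp only [PySem.Dict.values, PySem.Dict.keys, List.map_map]
  apply List.map_congr_left
  intro p hp
  exact (PySem.Dict.getD_of_mem_items d (by simpa using hp) h d0).symm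

theorem pvAdd_eq (s : List Int) (x : Int) : PySem.Set.add s x = if x ∈ s then s else s ++ [x] := by
  simp [PySem.Set.add, PySem.Set.contains]


theorem pvGetCrs_eq (p n : List (List Int)) : pvGetCrs p n = pvCross p n := by
  unfold pvGetCrs pvCross
  rw [PySem.List.foldl_append_eq_flatMap]
  simp

theorem pvA_eq (kls : List (List Int)) : crs_kinlis_py kls = pvOut kls := by
  unfold crs_kinlis_py pvOut
  have hc : (kls.foldl (fun cr kl =>
      if PySem.List.pyGetD kl 0 0 ∈ cr then cr else cr ++ [PySem.List.pyGetD kl 0 0]) ([] : List Int))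
      = PySem.Set.ofList (kls.map pvK) := by
    rw [PySem.Set.ofList_eq_foldl, List.foldl_map]
    apply PySem.List.foldl_congr_mem
    intro acc kl _
    rw [pvAdd_eq]
    simp [pvK]
  rw [hc]
  trans (PySem.Set.ofList (kls.map pvK)).foldl (fun nl fd => nl ++
      pvCross (kls.filter (fun kl => pvK kl == fd && pvIsPos kl))
              (kls.filter (fun kl => pvK kl == fd && !pvIsPos kl))) []
  · apply PySem.List.foldl_congr_mem
    intro nl fd _
    simp only [pvPartition_fold, pvGetCrs_eq]
    simp
  · rw [PySem.List.foldl_append_eq_flatMap]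
    simp

theorem pvB_eq (kls : List (List Int)) : crs_kinlis_py_alt kls = pvOut kls := by
  simp only [crs_kinlis_py_alt, pvOut]
  have hkeys : (kls.foldl (fun d kl => d.modify (PySem.List.pyGetD kl 0 0) [] (· ++ [kl]))
      (PySem.Dict.empty : PySem.Dict Int (List (List Int)))).keys = PySem.Set.ofList (kls.map pvK) := by
    rw [PySem.Dict.keys_foldl_modify_key kls (fun kl => PySem.List.pyGetD kl 0 0) [] (fun _ kl => (· ++ [kl]))]
    rw [PySem.Dict.keys_empty, PySem.Set.ofList_eq_foldl]
    rfl
  have hnodup : (kls.foldl (fun d kl => d.modify (PySem.List.pyGetD kl 0 0) [] (· ++ [kl]))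
      (PySem.Dict.empty : PySem.Dict Int (List (List Int)))).keys.Nodup :=
    PySem.Dict.nodup_keys_foldl_modify_key kls (fun kl => PySem.List.pyGetD kl 0 0) [] (fun _ kl => (· ++ [kl])) _ PySem.Dict.nodup_keys_empty
  have hgetD : ∀ c, (kls.foldl (fun d kl => d.modify (PySem.List.pyGetD kl 0 0) [] (· ++ [kl]))
      (PySem.Dict.empty : PySem.Dict Int (List (List Int)))).getD c []
      = kls.filter (fun kl => pvK kl == c) := by
    intro c
    have h := PySem.Dict.getD_foldl_modify_append
      (kls.map (fun kl => ((PySem.List.pyGetD kl 0 0 : Int), kl)))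
      (PySem.Dict.empty : PySem.Dict Int (List (List Int))) c
    rw [List.foldl_map] at h
    simpa [List.filter_map, Function.comp_def, pvK] using h
  rw [pvValues_eq_keys_map _ ([] : List (List Int)) hnodup, hkeys, List.foldl_map]
  trans (PySem.Set.ofList (kls.map pvK)).foldl (fun nl fd => nl ++
      pvCross (kls.filter (fun kl => pvK kl == fd && pvIsPos kl))
              (kls.filter (fun kl => pvK kl == fd && !pvIsPos kl))) []
  · apply PySem.List.foldl_congr_mem
    intro nl fd _
    simp only [hgetD]
    rw [PySem.List.foldl_append_eq_flatMap]
    simp only [pvCross, List.filter_filter]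
    congr 2
    congr 1 <;> (apply List.filter_congr; intro kl _; simp [pvK, pvIsPos, Bool.and_comm])
  · rw [PySem.List.foldl_append_eq_flatMap]
    simp

theorem main_eq (kls : List (List Int)) : crs_kinlis_py kls = crs_kinlis_py_alt kls := by
  rw [pvA_eq, pvB_eq]

-- ===== VERDICT (by name: the statement is the Claim_ definition above) =====
theorem crs_kinlis_py_spec : Claim_equal_crs_kinlis_py := by
  intro kls _ _
  unfold Spec_crs_kinlis_py
  exact main_eq kls
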